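-- pv_equiv track=rewrite | github.com/zwala/Pro_Euler | codingBat_List-2.py | sum13
-- ===== SOURCE A (Python) =====
-- def sum13(nums):
--     count = 0
--     while count < len(nums):
--         if nums[count] == 13:
--             del nums[count:count+2]
--             continue
--         count += 1
--     return sum(nums)
-- ===== SOURCE B (Python) =====
-- def sum13(nums):
--     total = 0
--     skip = False
--     for x in nums:
--         if skip:
--             skip = False
--         elif x == 13:
--             skip = True
--         else:
--             total += x
--     return total
-- ===== Notes on version B (the rewrite author's own statement) =====
-- stated objective: faster
-- what changed: Replaces the while loop that repeatedly deletes slices from the list (each del is O(n)) with a single left-to-right pass keeping a running total and a skip flag, never mutating the list.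
import Mathlib
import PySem

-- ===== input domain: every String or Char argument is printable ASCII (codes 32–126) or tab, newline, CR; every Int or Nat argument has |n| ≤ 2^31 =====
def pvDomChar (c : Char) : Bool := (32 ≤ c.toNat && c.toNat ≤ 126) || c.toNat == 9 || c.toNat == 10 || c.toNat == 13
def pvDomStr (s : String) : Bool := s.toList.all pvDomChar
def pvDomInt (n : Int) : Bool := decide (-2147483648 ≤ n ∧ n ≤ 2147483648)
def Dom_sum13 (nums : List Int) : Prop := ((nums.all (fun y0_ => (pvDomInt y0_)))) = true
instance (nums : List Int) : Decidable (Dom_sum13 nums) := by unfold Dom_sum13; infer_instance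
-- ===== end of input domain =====

-- B replaces A's while-loop with in-place slice deletions by a single pass with a
-- skip flag; equivalence is about the RETURN value only — the Python A mutates its
-- argument in place, B does not.

-- ===== PORT A =====
-- A's while loop: on nums[count] == 13, delete nums[count:count+2] (take/drop) and
-- re-check the same index; otherwise advance count. Finally sum the surviving list.
-- fuel is only a structural totality guard: nums.length iterations always suffice
-- (each step advances count or shortens the list), so the 0-fuel arm is never the
-- one that decides the result.
def sum13Loop (fuel count : Nat) (nums : List Int) : List Int :=
  match fuel with
  | 0 => nums
  | fuel + 1 =>
    if h : count < nums.length then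
      if nums[count] == 13 then
        sum13Loop fuel count (nums.take count ++ nums.drop (count + 2))
      else
        sum13Loop fuel (count + 1) nums
    else nums

def sum13 (nums : List Int) : Int := (sum13Loop nums.length 0 nums).sum

-- ===== PORT B =====
-- Source B: one pass over the list carrying (total, skip); the loop body:
def sum13AltStep (st : Int × Bool) (x : Int) : Int × Bool :=
  if st.2 then (st.1, false)
  else if x == 13 then (st.1, true)
  else (st.1 + x, st.2)

def sum13_alt (nums : List Int) : Int :=
  (nums.foldl sum13AltStep (0, false)).1

-- ===== PRECONDITION & SPEC =====
def Spec_sum13 (nums : List Int) (out : Int) : Prop := out = sum13_alt nums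
instance (nums : List Int) (out : Int) : Decidable (Spec_sum13 nums out) := by unfold Spec_sum13; infer_instance

-- ===== CLAIM (what is proved, stated in full; the proofs are below) =====
def Claim_equal_sum13 : Prop := ∀ (nums : List Int), Dom_sum13 nums → Spec_sum13 nums (sum13 nums)

-- ===== LEMMAS AND PROOFS =====

-- the skip-flag recursion, a proof-side characterisation of Source B's fold
def skipSum : Bool → List Int → Int
  | _, [] => 0
  | true, _ :: r => skipSum false r
  | false, x :: r => if x == 13 then skipSum true r else x + skipSum false r

theorem foldl_skipSum (l : List Int) (t : Int) (s : Bool) :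
    (l.foldl sum13AltStep (t, s)).1 = t + skipSum s l := by
  induction l generalizing t s with
  | nil => simp [skipSum]
  | cons x r ih =>
    cases s with
    | true =>
      rw [List.foldl_cons, show sum13AltStep (t, true) x = (t, false) from rfl, ih]
      rfl
    | false =>
      by_cases hx : x = 13
      · rw [List.foldl_cons,
          show sum13AltStep (t, false) x = (t, true) from by simp [sum13AltStep, hx], ih,
          show skipSum false (x :: r) = skipSum true r from by simp [skipSum, hx]]
      · rw [List.foldl_cons,
          show sum13AltStep (t, false) x = (t + x, false) from by simp [sum13AltStep, hx], ih,
          show skipSum false (x :: r) = x + skipSum false r from by simp [skipSum, hx]]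
        ring

theorem sum13_alt_eq (nums : List Int) : sum13_alt nums = skipSum false nums := by
  unfold sum13_alt
  rw [foldl_skipSum]; ring

theorem skipSum_drop (nums : List Int) (c : Nat) (h : c < nums.length) (h13 : nums[c] = 13) :
    skipSum false (nums.drop c) = skipSum false (nums.drop (c + 2)) := by
  have hd : nums.drop c = nums[c] :: nums.drop (c + 1) := List.drop_eq_getElem_cons h
  rw [hd, h13, show skipSum false (13 :: nums.drop (c + 1)) = skipSum true (nums.drop (c + 1))
    from by simp [skipSum]]
  rcases hlt : nums.drop (c + 1) with _ | ⟨y, r⟩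
  · have hlen : nums.length ≤ c + 1 := by
      have := congrArg List.length hlt
      simp at this
      omega
    rw [List.drop_eq_nil_of_le (by omega : nums.length ≤ c + 2)]
    rfl
  · have h3 : (nums.drop (c + 1)).drop 1 = nums.drop (c + 2) := by rw [List.drop_drop]
    have h2 : nums.drop (c + 2) = r := by rw [← h3, hlt]; rfl
    rw [h2]
    rfl

-- loop invariant: final sum = sum of the already-kept prefix + skipSum of the rest
theorem sum13Loop_sum (fuel : Nat) : ∀ (count : Nat) (nums : List Int),
    nums.length ≤ count + fuel →
    (sum13Loop fuel count nums).sum = (nums.take count).sum + skipSum false (nums.drop count) := by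
  induction fuel with
  | zero =>
    intro count nums hf
    have hdr : nums.drop count = [] := List.drop_eq_nil_of_le (by omega)
    have ht : nums.take count = nums := List.take_of_length_le (by omega)
    rw [show sum13Loop 0 count nums = nums from rfl, ht, hdr,
      show skipSum false ([] : List Int) = 0 from rfl]
    ring
  | succ fuel ih =>
    intro count nums hf
    simp only [sum13Loop]
    split
    · rename_i h
      split
      · rename_i h13
        rw [ih count (nums.take count ++ nums.drop (count + 2)) (by simp only [List.length_append, List.length_take, List.length_drop]; omega)]
        have hlen : (nums.take count).length = count := by simp; omega
        have ht : (nums.take count ++ nums.drop (count + 2)).take count = nums.take count := by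
          rw [List.take_append, hlen]
          simp
        have hdr : (nums.take count ++ nums.drop (count + 2)).drop count = nums.drop (count + 2) := by
          rw [List.drop_append, hlen]
          simp
        rw [ht, hdr, skipSum_drop nums count h (by simpa using h13)]
      · rename_i h13
        rw [ih (count + 1) nums (by omega),
          List.take_succ_eq_append_getElem h, List.drop_eq_getElem_cons h]
        have hx : nums[count] ≠ 13 := by simpa using h13
        rw [show skipSum false (nums[count] :: nums.drop (count + 1))
              = nums[count] + skipSum false (nums.drop (count + 1)) from by simp [skipSum, hx],
          List.sum_append]
        simp only [List.sum_cons, List.sum_nil]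
        ring
    · rename_i h
      have hdr : nums.drop count = [] := List.drop_eq_nil_of_le (by omega)
      have ht : nums.take count = nums := List.take_of_length_le (by omega)
      rw [ht, hdr, show skipSum false ([] : List Int) = 0 from rfl]
      ring

-- ===== VERDICT (by name: the statement is the Claim_ definition above) =====
theorem sum13_spec : Claim_equal_sum13 := by
  intro nums _
  unfold Spec_sum13 sum13
  rw [sum13Loop_sum nums.length 0 nums (by omega), sum13_alt_eq]
  simp
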